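-- pv_equiv track=rewrite | github.com/ngohoanhkhoa/Generative_Probabilistic_Alignment_Models | Attention_based_model/evaluation.py | count_token_hits
-- ===== SOURCE A (Python) =====
-- def count_token_hits(gold, seg):
--     """ Count the number of words correctly segmented in seg
--     w.r.t. the gold reference gold.
--     """
--
--     hits = 0
--     left_bound = True
--     for i in range(len(seg)):
--         if seg[i] and gold[i]:
--             if left_bound:
--                 hits += 1
--             left_bound = True
--         elif (seg[i] and not gold[i]) or (not seg[i] and gold[i]):
--             left_bound = False
--     if left_bound:
--         hits += 1
--     return hits
-- ===== SOURCE B (Python) =====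
-- def count_token_hits(gold, seg):
--     """ Count the number of words correctly segmented in seg
--     w.r.t. the gold reference gold.
--     """
--     n = len(seg)
--     mis = [0]          # mis[j] = number of disagreeing positions among indices < j
--     agreed = []        # indices where seg and gold both mark a boundary
--     for i in range(n):
--         s = bool(seg[i])
--         g = bool(gold[i])
--         mis.append(mis[-1] + (1 if s != g else 0))
--         if s and g:
--             agreed.append(i)
--     # a word is correct iff the interval between two consecutive agreed
--     # boundaries (with virtual boundaries at -1 and n) contains no mismatch
--     pts = [-1] + agreed + [n]
--     return sum(1 for a, b in zip(pts, pts[1:]) if mis[b] == mis[a + 1])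
-- ===== Notes on version B (the rewrite author's own statement) =====
-- stated objective: alternative
-- what changed: A scans once with a hits counter and a left_bound flag; B instead builds a mismatch prefix-sum array and the list of agreed boundaries, then counts the regions between consecutive agreed boundaries (with virtual boundaries at -1 and len(seg)) whose interior contains no mismatch.
import Mathlib
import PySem

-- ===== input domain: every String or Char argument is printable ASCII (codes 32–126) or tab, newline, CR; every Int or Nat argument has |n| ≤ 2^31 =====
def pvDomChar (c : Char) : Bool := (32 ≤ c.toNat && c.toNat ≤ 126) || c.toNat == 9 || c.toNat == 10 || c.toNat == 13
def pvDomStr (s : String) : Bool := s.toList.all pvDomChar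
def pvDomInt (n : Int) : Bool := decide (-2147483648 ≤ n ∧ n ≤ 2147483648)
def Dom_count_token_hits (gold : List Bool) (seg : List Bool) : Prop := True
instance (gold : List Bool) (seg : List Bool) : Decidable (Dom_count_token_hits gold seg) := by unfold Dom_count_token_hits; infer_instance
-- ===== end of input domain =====

-- B counts clean regions between agreed boundaries via a mismatch prefix-sum, instead of A's flag-carrying scan (alternative decomposition, same cost).

-- ===== PORT A =====
-- gold[i] is in range for every i < len(seg) under Pre_ (otherwise Python raises IndexError), so getD is exact there.
def count_token_hits (gold : List Bool) (seg : List Bool) : Int :=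
  let st := (List.range seg.length).foldl (fun (st : Int × Bool) i =>
      let s := seg.getD i false
      let g := gold.getD i false
      if s && g then (if st.2 then st.1 + 1 else st.1, true)
      else if (s && !g) || (!s && g) then (st.1, false)
      else st) (0, true)
  if st.2 then st.1 + 1 else st.1

-- ===== PORT B =====
-- gold[i] in range under Pre_, as for A.
def count_token_hits_alt (gold : List Bool) (seg : List Bool) : Int :=
  let n := seg.length
  let st := (List.range n).foldl (fun (st : List Int × List Int) i =>
      let s := seg.getD i false
      let g := gold.getD i false
      let mis := st.1 ++ [st.1.getLastD 0 + (if s != g then 1 else 0)]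
      let agreed := if s && g then st.2 ++ [Int.ofNat i] else st.2
      (mis, agreed)) ([0], [])
  let pts : List Int := [-1] ++ st.2 ++ [(n : Int)]
  ((pts.zip pts.tail).countP (fun p =>
      PySem.List.pyGetD st.1 p.2 0 == PySem.List.pyGetD st.1 (p.1 + 1) 0) : Int)

-- ===== PRECONDITION & SPEC =====
-- Pre_ excludes exactly the inputs where Python A raises IndexError (gold shorter than seg; both A and B index gold[i] for every i < len(seg)).
def Pre_count_token_hits (gold : List Bool) (seg : List Bool) : Prop := seg.length ≤ gold.length
instance (gold : List Bool) (seg : List Bool) : Decidable (Pre_count_token_hits gold seg) := by unfold Pre_count_token_hits; infer_instance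
def pvWitness_count_token_hits : List Bool × List Bool := ([true, false, true], [true, true, false])

def Spec_count_token_hits (gold : List Bool) (seg : List Bool) (out : Int) : Prop := out = count_token_hits_alt gold seg
instance (gold : List Bool) (seg : List Bool) (out : Int) : Decidable (Spec_count_token_hits gold seg out) := by unfold Spec_count_token_hits; infer_instance

-- ===== CLAIM (what is proved, stated in full; the proofs are below) =====
def Claim_equal_count_token_hits : Prop := ∀ (gold : List Bool) (seg : List Bool), Dom_count_token_hits gold seg → Pre_count_token_hits gold seg → Spec_count_token_hits gold seg (count_token_hits gold seg)

-- ===== LEMMAS AND PROOFS =====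

-- number of disagreeing positions among indices < j
def pvMis (gold seg : List Bool) (j : Nat) : Int :=
  ((List.range j).countP (fun i => seg.getD i false != gold.getD i false) : Int)

-- agreed-boundary indices < k, as Ints
def pvAgr (gold seg : List Bool) (k : Nat) : List Int :=
  ((List.range k).filter (fun i => seg.getD i false && gold.getD i false)).map Int.ofNat

-- count of adjacent pairs of pts whose interior contains no mismatch
def pvPair (gold seg : List Bool) (pts : List Int) : Int :=
  ((pts.zip pts.tail).countP (fun p =>
      pvMis gold seg p.2.toNat == pvMis gold seg (p.1 + 1).toNat) : Int)

def pvLb (gold seg : List Bool) (k : Nat) : Bool :=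
  pvMis gold seg k == pvMis gold seg ((pvAgr gold seg k).getLastD (-1) + 1).toNat

lemma pvMis_succ (gold seg : List Bool) (k : Nat) :
    pvMis gold seg (k + 1) =
      pvMis gold seg k + (if seg.getD k false != gold.getD k false then 1 else 0) := by
  unfold pvMis
  rw [List.range_succ, List.countP_append]
  simp [List.countP_cons]

lemma pvMis_mono (gold seg : List Bool) {j k : Nat} (h : j ≤ k) :
    pvMis gold seg j ≤ pvMis gold seg k := by
  induction k with
  | zero =>
    have : j = 0 := by omega
    simp [this]
  | succ k ih =>
    rcases Nat.lt_or_ge j (k+1) with h' | h'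
    · have := ih (by omega)
      rw [pvMis_succ]
      split_ifs <;> omega
    · have : j = k + 1 := by omega
      simp [this]

lemma pvAgr_succ (gold seg : List Bool) (k : Nat) :
    pvAgr gold seg (k + 1) =
      if seg.getD k false && gold.getD k false then pvAgr gold seg k ++ [Int.ofNat k]
      else pvAgr gold seg k := by
  unfold pvAgr
  rw [List.range_succ, List.filter_append, List.filter_singleton, List.map_append]
  cases h : (seg.getD k false && gold.getD k false) <;> simp [h]

lemma pvAgr_mem (gold seg : List Bool) (k : Nat) {x : Int} (hx : x ∈ pvAgr gold seg k) :
    0 ≤ x ∧ x < (k : Int) := by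
  unfold pvAgr at hx
  simp only [List.mem_map] at hx
  obtain ⟨i, hi, rfl⟩ := hx
  have h2 : i ∈ List.range k := List.mem_of_mem_filter hi
  rw [List.mem_range] at h2
  rw [Int.ofNat_eq_natCast]
  constructor <;> omega

lemma pvAgr_lastD_bounds (gold seg : List Bool) (k : Nat) :
    -1 ≤ (pvAgr gold seg k).getLastD (-1) ∧ (pvAgr gold seg k).getLastD (-1) ≤ (k : Int) - 1 := by
  rcases h : pvAgr gold seg k with _ | ⟨a, l⟩
  · constructor
    · simp
    · simp
      omega
  · have hm : (a :: l).getLastD (-1) ∈ (a :: l) := by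
      rw [List.getLastD_cons]
      exact List.getLastD_mem_cons
    have := pvAgr_mem gold seg k (x := (a :: l).getLastD (-1)) (by rw [h]; exact hm)
    constructor <;> omega

lemma cons_lastD (l : List Int) : ((-1 : Int) :: l).getLastD (-1) = l.getLastD (-1) := by
  cases l <;> simp

-- zip-with-tail after appending one element
lemma zip_tail_append {α : Type} (l : List α) (x d : α) (h : l ≠ []) :
    (l ++ [x]).zip (l ++ [x]).tail = l.zip l.tail ++ [(l.getLastD d, x)] := by
  induction l with
  | nil => simp at h
  | cons a t ih =>
    cases t with
    | nil => simp
    | cons b t' =>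
      have := ih (by simp)
      simp only [List.cons_append, List.zip_cons_cons, List.tail_cons] at this ⊢
      rw [this]
      simp [List.getLastD_cons]

lemma mem_zip_tail {α : Type} (l : List α) (p : α × α) (hp : p ∈ l.zip l.tail) :
    p.1 ∈ l.dropLast ∧ p.2 ∈ l.tail := by
  induction l with
  | nil => simp at hp
  | cons a t ih =>
    cases t with
    | nil => simp at hp
    | cons b t' =>
      simp only [List.tail_cons, List.zip_cons_cons, List.mem_cons] at hp
      rcases hp with rfl | hp
      · simp [List.dropLast]
      · have h := ih hp
        refine ⟨?_, ?_⟩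
        · rw [List.dropLast_cons₂]
          exact List.mem_cons_of_mem _ h.1
        · exact List.mem_cons_of_mem _ h.2

-- pvPair of appending one more boundary point
lemma pvPair_append (gold seg : List Bool) (l : List Int) (x : Int) (h : l ≠ []) :
    pvPair gold seg (l ++ [x]) =
      pvPair gold seg l +
        (if pvMis gold seg x.toNat == pvMis gold seg (l.getLastD (-1) + 1).toNat then 1 else 0) := by
  unfold pvPair
  rw [zip_tail_append l x (-1) h, List.countP_append]
  simp [List.countP_cons]

-- A's fold characterised
lemma A_fold (gold seg : List Bool) (k : Nat) :
    (List.range k).foldl (fun (st : Int × Bool) i =>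
      let s := seg.getD i false
      let g := gold.getD i false
      if s && g then (if st.2 then st.1 + 1 else st.1, true)
      else if (s && !g) || (!s && g) then (st.1, false)
      else st) (0, true) =
    (pvPair gold seg ([-1] ++ pvAgr gold seg k), pvLb gold seg k) := by
  induction k with
  | zero =>
    simp [pvAgr, pvPair, pvLb, pvMis]
  | succ k ih =>
    rw [List.range_succ, List.foldl_append, ih]
    simp only [List.foldl_cons, List.foldl_nil]
    cases hs : seg.getD k false <;> cases hg : gold.getD k false
    · -- both false: no event
      have hag : pvAgr gold seg (k+1) = pvAgr gold seg k := by
        rw [pvAgr_succ, hs, hg]; simp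
      have hmis : pvMis gold seg (k+1) = pvMis gold seg k := by
        rw [pvMis_succ, hs, hg]; simp
      simp [hs, pvLb, hag, hmis]
    · -- seg false, gold true: mismatch
      have hag : pvAgr gold seg (k+1) = pvAgr gold seg k := by
        rw [pvAgr_succ, hs, hg]; simp
      have hmis : pvMis gold seg (k+1) = pvMis gold seg k + 1 := by
        rw [pvMis_succ, hs, hg]; simp
      have hb := pvAgr_lastD_bounds gold seg k
      have hmono : pvMis gold seg ((pvAgr gold seg k).getLastD (-1) + 1).toNat ≤ pvMis gold seg k :=
        pvMis_mono gold seg (by omega)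
      have hlb' : pvLb gold seg (k+1) = false := by
        simp only [pvLb, hag, hmis, beq_eq_false_iff_ne, ne_eq]
        omega
      simp [hs, hag, hlb']
    · -- seg true, gold false: mismatch
      have hag : pvAgr gold seg (k+1) = pvAgr gold seg k := by
        rw [pvAgr_succ, hs, hg]; simp
      have hmis : pvMis gold seg (k+1) = pvMis gold seg k + 1 := by
        rw [pvMis_succ, hs, hg]; simp
      have hb := pvAgr_lastD_bounds gold seg k
      have hmono : pvMis gold seg ((pvAgr gold seg k).getLastD (-1) + 1).toNat ≤ pvMis gold seg k :=
        pvMis_mono gold seg (by omega)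
      have hlb' : pvLb gold seg (k+1) = false := by
        simp only [pvLb, hag, hmis, beq_eq_false_iff_ne, ne_eq]
        omega
      simp [hs, hg, hag, hlb']
    · -- both true: agreed boundary
      have hag : pvAgr gold seg (k+1) = pvAgr gold seg k ++ [(k : Int)] := by
        rw [pvAgr_succ, hs, hg]
        simp [Int.ofNat_eq_natCast]
      have hmis : pvMis gold seg (k+1) = pvMis gold seg k := by
        rw [pvMis_succ, hs, hg]; simp
      have hpair :
          pvPair gold seg (-1 :: (pvAgr gold seg k ++ [(k : Int)])) =
            pvPair gold seg (-1 :: pvAgr gold seg k) +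
              (if pvLb gold seg k then 1 else 0) := by
        rw [show (-1 : Int) :: (pvAgr gold seg k ++ [(k : Int)]) =
            ((-1 :: pvAgr gold seg k) ++ [(k : Int)]) by simp]
        rw [pvPair_append gold seg _ _ (by simp)]
        congr 1
        rw [cons_lastD]
        unfold pvLb
        rw [show ((k : Int)).toNat = k by simp]
      have hlb' : pvLb gold seg (k+1) = true := by
        simp only [pvLb, hag, hmis]
        rw [show (pvAgr gold seg k ++ [(k : Int)]).getLastD (-1) = (k : Int) by simp]
        rw [show ((k : Int) + 1).toNat = k + 1 by omega]
        simp [hmis]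
      by_cases hl : pvLb gold seg k = true <;>
        simp [hag, hlb', hpair, hl]

-- B's fold characterised
lemma B_fold (gold seg : List Bool) (k : Nat) :
    (List.range k).foldl (fun (st : List Int × List Int) i =>
      let s := seg.getD i false
      let g := gold.getD i false
      let mis := st.1 ++ [st.1.getLastD 0 + (if s != g then 1 else 0)]
      let agreed := if s && g then st.2 ++ [Int.ofNat i] else st.2
      (mis, agreed)) ([0], []) =
    ((List.range (k+1)).map (pvMis gold seg), pvAgr gold seg k) := by
  induction k with
  | zero =>
    simp [pvAgr, pvMis, List.range_succ]
  | succ k ih =>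
    rw [List.range_succ, List.foldl_append, ih]
    simp only [List.foldl_cons, List.foldl_nil]
    have hlast : ((List.range (k+1)).map (pvMis gold seg)).getLastD 0 = pvMis gold seg k := by
      rw [List.range_succ]
      simp
    have hmap : (List.range (k+1)).map (pvMis gold seg) ++
        [pvMis gold seg k + (if seg.getD k false != gold.getD k false then 1 else 0)] =
        (List.range (k+1+1)).map (pvMis gold seg) := by
      rw [List.range_succ (n := k+1), List.map_append, ← pvMis_succ]
      simp
    refine Prod.ext ?_ ?_
    · simp only [hlast, hmap]
    · simp only []
      rw [pvAgr_succ]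

lemma pyGetD_map_range_mis (gold seg : List Bool) (n : Nat) (j : Int)
    (h0 : 0 ≤ j) (h1 : j ≤ (n : Int)) :
    PySem.List.pyGetD ((List.range (n+1)).map (pvMis gold seg)) j 0 = pvMis gold seg j.toNat := by
  have hj : j.toNat < n + 1 := by omega
  rw [PySem.List.pyGetD_of_nonneg _ _ h0, PySem.List.getD_map_range _ _ _ _ hj]

-- B's result characterised
lemma B_result (gold seg : List Bool) :
    count_token_hits_alt gold seg =
      pvPair gold seg (([-1] ++ pvAgr gold seg seg.length) ++ [(seg.length : Int)]) := by
  simp only [count_token_hits_alt]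
  rw [B_fold]
  unfold pvPair
  have hpts : ([-1] ++ pvAgr gold seg seg.length) ++ [(seg.length : Int)] =
      [-1] ++ pvAgr gold seg seg.length ++ [(seg.length : Int)] := by simp
  rw [hpts]
  congr 1
  apply List.countP_congr
  intro p hp
  have hmem := mem_zip_tail _ p hp
  have hdl : ([-1] ++ pvAgr gold seg seg.length ++ [(seg.length : Int)]).dropLast =
      (-1 : Int) :: pvAgr gold seg seg.length := by
    rw [show ([-1] ++ pvAgr gold seg seg.length ++ [(seg.length : Int)]) =
        ((-1 : Int) :: pvAgr gold seg seg.length) ++ [(seg.length : Int)] by simp,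
      List.dropLast_concat]
  have htl : ([-1] ++ pvAgr gold seg seg.length ++ [(seg.length : Int)]).tail =
      pvAgr gold seg seg.length ++ [(seg.length : Int)] := by
    simp
  rw [hdl] at hmem
  rw [htl] at hmem
  have h1 : -1 ≤ p.1 ∧ p.1 ≤ (seg.length : Int) - 1 := by
    rcases List.mem_cons.mp hmem.1 with h | h
    · rw [h]; constructor <;> omega
    · have := pvAgr_mem gold seg seg.length h
      constructor <;> omega
  have h2 : 0 ≤ p.2 ∧ p.2 ≤ (seg.length : Int) := by
    rcases List.mem_append.mp hmem.2 with h | h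
    · have := pvAgr_mem gold seg seg.length h
      constructor <;> omega
    · simp at h
      rw [h]; constructor <;> omega
  rw [pyGetD_map_range_mis gold seg seg.length p.2 h2.1 h2.2,
      pyGetD_map_range_mis gold seg seg.length (p.1 + 1) (by omega) (by omega)]

-- ===== VERDICT (by name: the statement is the Claim_ definition above) =====
theorem count_token_hits_spec : Claim_equal_count_token_hits := by
  intro gold seg _ _
  unfold Spec_count_token_hits
  rw [B_result]
  simp only [count_token_hits]
  rw [A_fold]
  rw [pvPair_append gold seg _ _ (by simp)]
  rw [List.singleton_append, cons_lastD]
  rw [show ((seg.length : Int)).toNat = seg.length by omega]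
  unfold pvLb
  split_ifs with h <;> simp_all
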